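-- pv_equiv track=rewrite | github.com/RikvanToor/aoc2022 | days/day22.py | get_h_bounds
-- ===== SOURCE A (Python) =====
-- def get_h_bounds(m):
--   res = []
--   for l in m:
--     min_x = len(l) - 1
--     max_x = 0
--     for x in range(len(l)):
--       c = l[x]
--       if c != ' ':
--         min_x = min(min_x, x)
--         max_x = max(max_x, x)
--     res.append((min_x, max_x))
--   return res
-- ===== SOURCE B (Python) =====
-- def get_h_bounds(m):
--   res = []
--   for l in m:
--     idxs = [x for x, c in enumerate(l) if c != ' ']
--     if idxs:
--       res.append((idxs[0], idxs[-1]))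
--     else:
--       res.append((len(l) - 1, 0))
--   return res
-- ===== Notes on version B (the rewrite author's own statement) =====
-- stated objective: simpler
-- what changed: Instead of a running-min/max accumulator pass per row, B collects the non-space column indices once (enumerate + filter comprehension) and reads the bounds off as the first and last collected index, keeping A's (len-1, 0) default for rows with no content.
import Mathlib
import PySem

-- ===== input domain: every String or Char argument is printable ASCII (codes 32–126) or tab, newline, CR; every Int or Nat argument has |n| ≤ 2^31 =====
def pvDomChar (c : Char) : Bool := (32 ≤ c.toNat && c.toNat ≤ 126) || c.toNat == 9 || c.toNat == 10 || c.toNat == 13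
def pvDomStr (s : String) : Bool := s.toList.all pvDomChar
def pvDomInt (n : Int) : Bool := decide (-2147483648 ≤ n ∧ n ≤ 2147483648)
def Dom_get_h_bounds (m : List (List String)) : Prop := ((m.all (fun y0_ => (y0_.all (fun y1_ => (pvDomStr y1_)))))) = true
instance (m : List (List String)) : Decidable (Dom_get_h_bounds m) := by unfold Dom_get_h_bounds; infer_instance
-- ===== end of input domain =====

-- B replaces A's running-min/max accumulator pass per row by collecting the non-space
-- indices once and reading the first/last off that list (objective: simpler); same defaults.

-- ===== PORT A =====
-- inner loop 'for x in range(len(l)): c = l[x]; if c != ' ': …'; the index is always in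
-- range, so 'pyGetD l x ""' is exact here.
def get_h_bounds (m : List (List String)) : List (Int × Int) :=
  m.foldl (fun res l =>
    let p :=
      (PySem.List.pyRange 0 (PySem.List.len l) 1).foldl
        (fun (mm : Int × Int) x =>
          let c := PySem.List.pyGetD l x ""
          if c ≠ " " then (min mm.1 x, max mm.2 x) else mm)
        (PySem.List.len l - 1, 0)
    res ++ [p]) []

-- ===== PORT B =====
-- 'idxs = [x for x, c in enumerate(l) if c != ' ']'
def pvIdxs (l : List String) : List Int :=
  (PySem.List.enumerate l).filterMap (fun xc => if xc.2 ≠ " " then some xc.1 else none)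

-- for nonempty idxs, 'idxs[0]' is its head and 'idxs[-1]' its last element
def get_h_bounds_alt (m : List (List String)) : List (Int × Int) :=
  m.foldl (fun res l =>
    let p :=
      match pvIdxs l with
      | [] => (PySem.List.len l - 1, 0)
      | x :: rest => (x, rest.getLastD x)
    res ++ [p]) []

-- ===== PRECONDITION & SPEC =====
def Spec_get_h_bounds (m : List (List String)) (out : List (Int × Int)) : Prop := out = get_h_bounds_alt m
instance (m : List (List String)) (out : List (Int × Int)) : Decidable (Spec_get_h_bounds m out) := by unfold Spec_get_h_bounds; infer_instance

-- ===== CLAIM (what is proved, stated in full; the proofs are below) =====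
def Claim_equal_get_h_bounds : Prop := ∀ (m : List (List String)), Dom_get_h_bounds m → Spec_get_h_bounds m (get_h_bounds m)

-- ===== LEMMAS AND PROOFS =====

-- a conditional min/max fold over (index, char) pairs is the unconditional fold over the kept indices
theorem pv_fold_if_pairs (ps : List (Int × String)) (init : Int × Int) :
    ps.foldl (fun (mm : Int × Int) p =>
        if p.2 ≠ " " then (min mm.1 p.1, max mm.2 p.1) else mm) init
    = (ps.filterMap (fun p => if p.2 ≠ " " then some p.1 else none)).foldl
        (fun mm x => (min mm.1 x, max mm.2 x)) init := by
  induction ps generalizing init with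
  | nil => rfl
  | cons p t ih =>
      by_cases h : p.2 = " "
      · have h1 : (p :: t).filterMap (fun p => if p.2 ≠ " " then some p.1 else none)
            = t.filterMap (fun p => if p.2 ≠ " " then some p.1 else none) := by simp [h]
        rw [h1, List.foldl_cons, if_neg (by simp [h]), ih]
      · have h1 : (p :: t).filterMap (fun p => if p.2 ≠ " " then some p.1 else none)
            = p.1 :: t.filterMap (fun p => if p.2 ≠ " " then some p.1 else none) := by simp [h]
        rw [h1, List.foldl_cons, if_pos h, List.foldl_cons, ih]

theorem pv_foldl_min_const (t : List Int) (x : Int) (h : ∀ y ∈ t, x ≤ y) : t.foldl min x = x := by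
  induction t with
  | nil => rfl
  | cons z r ih =>
      rw [List.foldl_cons, min_eq_left (h z (by simp))]
      exact ih (fun y hy => h y (by simp [hy]))

theorem pv_foldl_min_head (xs : List Int) (a : Int)
    (hs : xs.Pairwise (· ≤ ·)) (hb : ∀ y ∈ xs, y ≤ a) :
    xs.foldl min a = xs.headD a := by
  cases xs with
  | nil => rfl
  | cons x t =>
      rw [List.foldl_cons, min_eq_right (hb x (by simp)), List.headD_cons]
      exact pv_foldl_min_const t x (fun y hy => List.rel_of_pairwise_cons hs hy)

theorem pv_foldl_max_last (xs : List Int) (a : Int)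
    (hs : xs.Pairwise (· ≤ ·)) (hb : ∀ y ∈ xs, a ≤ y) :
    xs.foldl max a = xs.getLastD a := by
  induction xs generalizing a with
  | nil => rfl
  | cons x t ih =>
      rw [List.foldl_cons, max_eq_right (hb x (by simp)), List.getLastD_cons]
      exact ih x hs.tail (fun y hy => List.rel_of_pairwise_cons hs hy)

theorem pv_idxs_pairwise (l : List String) : (pvIdxs l).Pairwise (· ≤ ·) := by
  unfold pvIdxs
  rw [List.pairwise_filterMap]
  refine (PySem.List.pairwise_lt_enumerate l 0).imp ?_
  intro p q h x hx y hy
  by_cases hp : p.2 = " " <;> by_cases hq : q.2 = " " <;> simp [hp, hq] at hx hy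
  omega

theorem pv_idxs_mem (l : List String) : ∀ x ∈ pvIdxs l, 0 ≤ x ∧ x ≤ (l.length : Int) - 1 := by
  intro x hx
  unfold pvIdxs at hx
  obtain ⟨p, hp, hfx⟩ := List.mem_filterMap.1 hx
  obtain ⟨k, hk, rfl⟩ := (PySem.List.mem_enumerate_iff _ _ _).1 hp
  by_cases hc : l[k] = " " <;> simp [hc] at hfx
  subst hfx
  constructor <;> [omega; omega]

theorem pv_row_eq (l : List String) :
    (PySem.List.pyRange 0 (PySem.List.len l) 1).foldl
        (fun (mm : Int × Int) x =>
          let c := PySem.List.pyGetD l x ""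
          if c ≠ " " then (min mm.1 x, max mm.2 x) else mm)
        (PySem.List.len l - 1, 0)
    = match pvIdxs l with
      | [] => (PySem.List.len l - 1, 0)
      | x :: rest => (x, rest.getLastD x) := by
  have henum : (PySem.List.enumerate l 0) =
      (PySem.List.pyRange 0 (PySem.List.len l) 1).map (fun j => (j, PySem.List.pyGetD l j "")) :=
    PySem.List.enumerate_eq_map_pyRange l ""
  have h1 : (PySem.List.pyRange 0 (PySem.List.len l) 1).foldl
        (fun (mm : Int × Int) x =>
          let c := PySem.List.pyGetD l x ""
          if c ≠ " " then (min mm.1 x, max mm.2 x) else mm)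
        (PySem.List.len l - 1, 0)
      = (PySem.List.enumerate l 0).foldl
        (fun (mm : Int × Int) p =>
          if p.2 ≠ " " then (min mm.1 p.1, max mm.2 p.1) else mm)
        (PySem.List.len l - 1, 0) := by
    rw [henum, List.foldl_map]
  rw [h1, pv_fold_if_pairs]
  have hpw := pv_idxs_pairwise l
  have hmem := pv_idxs_mem l
  rw [PySem.List.foldl_prod_mk (f := fun s e => min s e) (g := fun s e => max s e)]
  have hmin : (pvIdxs l).foldl min (PySem.List.len l - 1) = (pvIdxs l).headD (PySem.List.len l - 1) := by
    apply pv_foldl_min_head _ _ hpw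
    intro y hy
    have := (hmem y hy).2
    simp only [PySem.List.len_eq]
    omega
  have hmax : (pvIdxs l).foldl max 0 = (pvIdxs l).getLastD 0 := by
    apply pv_foldl_max_last _ _ hpw
    intro y hy
    exact (hmem y hy).1
  have hfold : (List.filterMap (fun p : Int × String => if p.2 ≠ " " then some p.1 else none)
      (PySem.List.enumerate l)) = pvIdxs l := rfl
  rw [hfold, hmin, hmax]
  cases h : pvIdxs l with
  | nil => simp
  | cons x rest => rw [List.getLastD_cons, List.headD_cons]

-- ===== VERDICT (by name: the statement is the Claim_ definition above) =====
theorem get_h_bounds_spec : Claim_equal_get_h_bounds := by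
  intro m _
  unfold Spec_get_h_bounds get_h_bounds get_h_bounds_alt
  rw [PySem.List.foldl_append_singleton_eq_map, PySem.List.foldl_append_singleton_eq_map]
  simp only [List.nil_append]
  apply List.map_congr_left
  intro l _
  exact pv_row_eq l
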